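-- pv_equiv track=rewrite | github.com/yeonkkk/algorithm | Part 02/Chapter 03/3-2-3.py | solution
-- ===== SOURCE A (Python) =====
-- def solution(N, M, K, num_list):
--     result = 0
--     num_list.sort()
--     for i in range(1, M+1):
--         if i % K != 0:
--             result += num_list[-1]
--         else:
--             result += num_list[-2]
--     return result
-- ===== SOURCE B (Python) =====
-- def solution(N, M, K, num_list):
--     if M <= 0:
--         return 0
--     s = sorted(num_list)
--     c = M // abs(K)
--     if c == 0:
--         return M * s[-1]
--     return (M - c) * s[-1] + c * s[-2]
-- ===== Notes on version B (the rewrite author's own statement) =====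
-- stated objective: alternative
-- what changed: Replaces the per-iteration loop over range(1, M+1) with a closed-form count: M//abs(K) iterations pick the second-largest and the rest the largest, computed arithmetically after one sort (O(M) loop removed; the sort dominates, so a timing run did not confirm a speed-up).
import Mathlib
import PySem

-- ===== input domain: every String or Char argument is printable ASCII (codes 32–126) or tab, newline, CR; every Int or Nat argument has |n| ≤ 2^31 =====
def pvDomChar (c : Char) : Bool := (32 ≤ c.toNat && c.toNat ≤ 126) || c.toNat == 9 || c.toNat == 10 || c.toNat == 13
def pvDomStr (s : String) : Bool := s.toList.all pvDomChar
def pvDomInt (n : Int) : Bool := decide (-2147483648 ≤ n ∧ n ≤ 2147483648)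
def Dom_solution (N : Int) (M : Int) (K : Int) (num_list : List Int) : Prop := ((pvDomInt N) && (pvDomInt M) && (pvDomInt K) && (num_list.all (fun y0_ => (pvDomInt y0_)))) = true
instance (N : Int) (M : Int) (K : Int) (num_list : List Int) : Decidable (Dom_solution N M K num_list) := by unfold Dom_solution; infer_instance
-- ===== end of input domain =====

-- B replaces A's O(M) loop by a closed-form count (M//abs(K) picks of the second-largest),
-- keeping only the sort; A sorts num_list in place (caller-visible mutation), B does not —
-- the equivalence proved here is about the return value only.

-- ===== PORT A =====
def solution (N : Int) (M : Int) (K : Int) (num_list : List Int) : Int :=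
  let s := PySem.List.sorted num_list (fun x => x)
  (PySem.List.pyRange 1 (M + 1) 1).foldl
    (fun result i =>
      if PySem.Int.mod i K ≠ 0 then result + PySem.List.pyGetD s (-1) 0
      else result + PySem.List.pyGetD s (-2) 0) 0

-- ===== PORT B =====
def solution_alt (N : Int) (M : Int) (K : Int) (num_list : List Int) : Int :=
  if M ≤ 0 then 0
  else
    let s := PySem.List.sorted num_list (fun x => x)
    let c := PySem.Int.floordiv M |K|
    if c = 0 then M * PySem.List.pyGetD s (-1) 0
    else (M - c) * PySem.List.pyGetD s (-1) 0 + c * PySem.List.pyGetD s (-2) 0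

-- ===== PRECONDITION & SPEC =====
-- Exactly the inputs on which A returns: for M ≥ 1 it needs K ≠ 0 (i % K) and a non-empty
-- list (num_list[-1]); num_list[-2] is reached iff some i in 1..M is a multiple of K, i.e. |K| ≤ M.
def Pre_solution (N : Int) (M : Int) (K : Int) (num_list : List Int) : Prop :=
  M ≤ 0 ∨ (K ≠ 0 ∧ num_list ≠ [] ∧ (|K| ≤ M → 2 ≤ num_list.length))
instance (N : Int) (M : Int) (K : Int) (num_list : List Int) : Decidable (Pre_solution N M K num_list) := by unfold Pre_solution; infer_instance
def pvWitness_solution : Int × Int × Int × List Int := (4, 6, 3, [2, 4, 5, 5])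

def Spec_solution (N : Int) (M : Int) (K : Int) (num_list : List Int) (out : Int) : Prop := out = solution_alt N M K num_list
instance (N : Int) (M : Int) (K : Int) (num_list : List Int) (out : Int) : Decidable (Spec_solution N M K num_list out) := by unfold Spec_solution; infer_instance

-- ===== CLAIM (what is proved, stated in full; the proofs are below) =====
def Claim_equal_solution : Prop := ∀ (N : Int) (M : Int) (K : Int) (num_list : List Int), Dom_solution N M K num_list → Pre_solution N M K num_list → Spec_solution N M K num_list (solution N M K num_list)

-- ===== LEMMAS AND PROOFS =====

-- the branch test of A's loop body: i % K = 0 ↔ K.natAbs divides i (for i a natural number)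
lemma mod_eq_zero_natAbs (K : Int) (m : Nat) :
    PySem.Int.mod (m : Int) K = 0 ↔ K.natAbs ∣ m := by
  rw [PySem.Int.mod_eq_zero_iff_dvd]
  constructor
  · intro h; exact Int.ofNat_dvd.mp (Int.natAbs_dvd.mpr h)
  · intro h; exact Int.natAbs_dvd.mp (Int.ofNat_dvd.mpr h)

-- A's loop over range(1, M+1) in closed form: of the m iterations, m / |K| take branch b
lemma fold_closed (K : Int) (a b : Int) (m : Nat) :
    (PySem.List.pyRange 1 ((m : Int) + 1) 1).foldl
      (fun r i => if PySem.Int.mod i K ≠ 0 then r + a else r + b) 0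
    = ((m : Int) - ((m / K.natAbs : Nat) : Int)) * a + ((m / K.natAbs : Nat) : Int) * b := by
  induction m with
  | zero => simp [PySem.List.pyRange_one_eq_nil]
  | succ n ih =>
    have h1 : ((n + 1 : Nat) : Int) + 1 = ((n : Int) + 1) + 1 := by push_cast; ring
    rw [h1, PySem.List.pyRange_one_succ_right (by omega : (1 : Int) ≤ (n : Int) + 1),
        List.foldl_append, ih, List.foldl_cons, List.foldl_nil]
    have hmod : (PySem.Int.mod ((n : Int) + 1) K = 0) ↔ K.natAbs ∣ (n + 1) := by
      rw [show ((n : Int) + 1) = ((n + 1 : Nat) : Int) by push_cast; ring,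
          mod_eq_zero_natAbs K (n + 1)]
    by_cases hd : K.natAbs ∣ (n + 1)
    · rw [if_neg (by simp [hmod, hd]), Nat.succ_div_of_dvd hd]
      push_cast; ring
    · rw [if_pos (by simp [hmod, hd]), Nat.succ_div_of_not_dvd hd]
      push_cast; ring

-- ===== VERDICT (by name: the statement is the Claim_ definition above) =====
theorem solution_spec : Claim_equal_solution := by
  intro N M K num_list _ hpre
  unfold Spec_solution solution solution_alt
  by_cases hM : M ≤ 0
  · simp [PySem.List.pyRange_one_eq_nil (by omega : M + 1 ≤ 1), hM]
  · have hK : K ≠ 0 := by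
      rcases hpre with h | ⟨hK, _, _⟩; · omega
      · exact hK
    have hm : M = ((M.toNat : Nat) : Int) := by omega
    simp only [if_neg hM]
    set s := PySem.List.sorted num_list (fun x => x) with hs
    set a := PySem.List.pyGetD s (-1) 0 with ha
    set b := PySem.List.pyGetD s (-2) 0 with hb
    rw [hm, fold_closed K a b M.toNat]
    have habs : |K| = ((K.natAbs : Nat) : Int) := Int.abs_eq_natAbs K
    have hfd : PySem.Int.floordiv ((M.toNat : Nat) : Int) ((K.natAbs : Nat) : Int)
        = ((M.toNat / K.natAbs : Nat) : Int) := PySem.Int.floordiv_natCast _ _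
    rw [habs, hfd]
    by_cases hc : ((M.toNat / K.natAbs : Nat) : Int) = 0
    · rw [if_pos hc, hc]; ring
    · rw [if_neg hc]
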